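-- pv_equiv track=rewrite | github.com/antant2786/pythonhardway | random_python_exercise/plinko.py | generate_plinko_board
-- ===== SOURCE A (Python) =====
-- def generate_plinko_board(num_slots, num_rows, x_location):
--     # Create an empty grid
--     grid = [[' ' for _ in range(num_slots * 2 + 1)] for _ in range(num_rows)]
--
--     # Place pegs on the grid with shifting
--     for row in range(num_rows):
--         shift = row % 2  # Shift pegs for alternate rows
--         for col in range(num_slots * 2 + 1):
--             if col % 2 == shift:
--                 if (row, col) == x_location:
--                     grid[row][col] = 'O'
--                 else:
--                     grid[row][col] = ' '
--             else:
--                 grid[row][col] = '.'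
--
--     return grid
-- ===== SOURCE B (Python) =====
-- def generate_plinko_board(num_slots, num_rows, x_location):
--     # One row template built once by string repetition; every row is just a
--     # window of it shifted by the row parity; the marker is placed afterwards
--     # with a single guarded write. No per-cell parity or equality tests.
--     width = num_slots * 2 + 1
--     if num_rows <= 0:
--         return []
--     base = " ." * (num_slots + 1)
--     grid = [list(base[r % 2 : r % 2 + width]) for r in range(num_rows)]
--     r, c = x_location
--     if 0 <= r < num_rows and 0 <= c < width and c % 2 == r % 2:
--         grid[r][c] = 'O'
--     return grid
-- ===== Notes on version B (the rewrite author's own statement) =====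
-- stated objective: alternative
-- what changed: B never tests parity or tuple equality per cell: it builds one template string ' .'*(num_slots+1) by repetition, takes a parity-shifted window (slice) of it for every row, and then places the 'O' marker with a single bounds- and parity-guarded write.
import Mathlib
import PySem

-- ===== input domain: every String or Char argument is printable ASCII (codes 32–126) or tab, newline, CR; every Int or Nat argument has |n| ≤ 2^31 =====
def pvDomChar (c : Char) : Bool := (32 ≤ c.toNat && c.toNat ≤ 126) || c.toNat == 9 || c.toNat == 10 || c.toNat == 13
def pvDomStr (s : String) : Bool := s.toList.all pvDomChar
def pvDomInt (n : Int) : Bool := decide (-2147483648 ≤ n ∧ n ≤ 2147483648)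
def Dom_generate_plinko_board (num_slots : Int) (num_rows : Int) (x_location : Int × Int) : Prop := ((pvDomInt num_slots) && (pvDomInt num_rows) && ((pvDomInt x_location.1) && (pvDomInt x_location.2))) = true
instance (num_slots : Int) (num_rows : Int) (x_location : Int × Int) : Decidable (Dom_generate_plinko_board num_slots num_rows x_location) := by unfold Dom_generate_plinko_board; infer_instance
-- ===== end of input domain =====

-- B builds one template row by string repetition, slices a parity-shifted window of
-- it for each row and places the marker with one guarded write (alternative
-- decomposition, no per-cell tests); equivalence with A is proved on all inputs.
-- ===== PORT A =====
-- A first allocates an all-' ' grid and then its nested loops overwrite EVERY cell,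
-- so the transliteration is the nested map producing each cell from A's if-chain.
def generate_plinko_board (num_slots : Int) (num_rows : Int) (x_location : Int × Int) : List (List String) :=
  (PySem.List.pyRange 0 num_rows 1).map (fun row =>
    let shift := row % 2
    (PySem.List.pyRange 0 (num_slots * 2 + 1) 1).map (fun col =>
      if col % 2 = shift then
        (if (row, col) = x_location then "O" else " ")
      else "."))

-- ===== PORT B =====
-- Python's string " ." * (num_slots + 1) is modeled as the list of its 1-char
-- cells (Source B immediately converts each slice with list()); string repetition is
-- List.replicate + flatten, string slicing is PySem.List.slice (same semantics).
def generate_plinko_board_alt (num_slots : Int) (num_rows : Int) (x_location : Int × Int) : List (List String) :=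
  let width := num_slots * 2 + 1
  if num_rows ≤ 0 then [] else
  let base : List String := (List.replicate (num_slots + 1).toNat [" ", "."]).flatten
  let grid := (PySem.List.pyRange 0 num_rows 1).map (fun r =>
    PySem.List.slice base (some (r % 2)) (some (r % 2 + width)))
  let r := x_location.1
  let c := x_location.2
  if 0 ≤ r ∧ r < num_rows ∧ 0 ≤ c ∧ c < width ∧ c % 2 = r % 2 then
    grid.modify r.toNat (fun rowl => rowl.set c.toNat "O")
  else grid

-- ===== PRECONDITION & SPEC =====
def Spec_generate_plinko_board (num_slots : Int) (num_rows : Int) (x_location : Int × Int) (out : List (List String)) : Prop := out = generate_plinko_board_alt num_slots num_rows x_location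
instance (num_slots : Int) (num_rows : Int) (x_location : Int × Int) (out : List (List String)) : Decidable (Spec_generate_plinko_board num_slots num_rows x_location out) := by unfold Spec_generate_plinko_board; infer_instance

-- ===== CLAIM (what is proved, stated in full; the proofs are below) =====
def Claim_equal_generate_plinko_board : Prop := ∀ (num_slots : Int) (num_rows : Int) (x_location : Int × Int), Dom_generate_plinko_board num_slots num_rows x_location → Spec_generate_plinko_board num_slots num_rows x_location (generate_plinko_board num_slots num_rows x_location)

-- ===== LEMMAS AND PROOFS =====

-- length of the flattened template
lemma pv_flatten_rep_length {α : Type} (k : Nat) (a b : α) :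
    ((List.replicate k [a, b]).flatten).length = 2 * k := by
  induction k with
  | zero => simp
  | succ n ih => simp [List.replicate_succ, ih]; omega

-- element i of the flattened template alternates a, b
lemma pv_flatten_rep_get {α : Type} (k : Nat) (a b : α) (i : Nat)
    (h : i < ((List.replicate k [a, b]).flatten).length) :
    ((List.replicate k [a, b]).flatten)[i] = if i % 2 = 0 then a else b := by
  induction k generalizing i with
  | zero => simp at h
  | succ n ih =>
    simp only [List.replicate_succ, List.flatten_cons]
    rcases i with _ | _ | j
    · simp
    · simp
    · rw [List.getElem_append_right (by simp)]
      have := ih j (by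
        rw [pv_flatten_rep_length]
        rw [pv_flatten_rep_length] at h
        omega)
      have hmod : (j + 1 + 1) % 2 = j % 2 := by omega
      simpa [hmod] using this

-- a parity-shifted window of the template is exactly A's peg-pattern row
lemma pv_row_eq (ns r : Int) :
    PySem.List.slice ((List.replicate (ns + 1).toNat [" ", "."]).flatten)
      (some (r % 2)) (some (r % 2 + (ns * 2 + 1))) =
    (PySem.List.pyRange 0 (ns * 2 + 1) 1).map
      (fun col => if col % 2 = r % 2 then " " else ".") := by
  have hs : r % 2 = 0 ∨ r % 2 = 1 := Int.emod_two_eq r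
  by_cases hns : 0 ≤ ns
  · have h0 : (0 : Int) ≤ r % 2 := by omega
    have h1 : (0 : Int) ≤ r % 2 + (ns * 2 + 1) := by omega
    rw [PySem.List.slice_toNat _ h0 h1]
    apply List.ext_getElem
    · simp only [List.length_take, List.length_drop, pv_flatten_rep_length,
        List.length_map, PySem.List.length_pyRange_one]
      omega
    · intro j hj1 hj2
      simp only [List.getElem_take, List.getElem_drop, List.getElem_map,
        PySem.List.getElem_pyRange_one]
      have hjw : j < (ns * 2 + 1 - 0).toNat := by
        simpa [PySem.List.length_pyRange_one] using hj2
      rw [pv_flatten_rep_get _ _ _ _ (by rw [pv_flatten_rep_length]; omega)]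
      split_ifs with hP hQ <;> first | rfl | omega
  · -- ns < 0: the width is ≤ 0, so both sides are the empty row
    have hw : ns * 2 + 1 ≤ 0 := by omega
    rw [PySem.List.pyRange_one_eq_nil (by omega), List.map_nil,
      ← List.length_eq_zero_iff, PySem.List.length_slice]
    have hlen : ((List.replicate (ns + 1).toNat [(" " : String), "."]).flatten).length
        = 2 * (ns + 1).toNat := pv_flatten_rep_length _ _ _
    have hmono : PySem.List.clampIdx
        ((List.replicate (ns + 1).toNat [(" " : String), "."]).flatten).length
          (r % 2 + (ns * 2 + 1)) ≤
        PySem.List.clampIdx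
        ((List.replicate (ns + 1).toNat [(" " : String), "."]).flatten).length (r % 2) := by
      simp only [PySem.List.clampIdx, hlen]
      split_ifs <;> omega
    omega

-- ===== VERDICT (by name: the statement is the Claim_ definition above) =====
theorem generate_plinko_board_spec : Claim_equal_generate_plinko_board := by
  intro num_slots num_rows x_location _
  unfold Spec_generate_plinko_board generate_plinko_board generate_plinko_board_alt
  simp only []
  set width := num_slots * 2 + 1 with hw
  obtain ⟨r, c⟩ := x_location
  dsimp only
  by_cases hnr : num_rows ≤ 0
  · rw [if_pos hnr,
      show PySem.List.pyRange 0 num_rows 1 = [] from PySem.List.pyRange_one_eq_nil (by omega),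
      List.map_nil]
  rw [if_neg hnr]
  have hB : (PySem.List.pyRange 0 num_rows 1).map (fun r =>
      PySem.List.slice ((List.replicate (num_slots + 1).toNat [" ", "."]).flatten)
        (some (r % 2)) (some (r % 2 + width))) =
      (PySem.List.pyRange 0 num_rows 1).map (fun r =>
        (PySem.List.pyRange 0 width 1).map
          (fun col => if col % 2 = r % 2 then " " else ".")) := by
    apply List.map_congr_left
    intro row hrow
    rw [PySem.List.mem_pyRange_one] at hrow
    exact pv_row_eq num_slots row
  rw [hB]
  by_cases hcond : 0 ≤ r ∧ r < num_rows ∧ 0 ≤ c ∧ c < width ∧ c % 2 = r % 2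
  · rw [if_pos hcond]
    obtain ⟨hr0, hrlt, hc0, hclt, hpar⟩ := hcond
    apply List.ext_getElem
    · simp [List.length_modify]
    · intro i h1 h2
      rw [List.getElem_modify]
      have hi : i < (num_rows - 0).toNat := by
        simpa [PySem.List.length_pyRange_one] using h1
      rw [List.getElem_map, List.getElem_map, PySem.List.getElem_pyRange_one]
      by_cases hir : r.toNat = i
      · rw [if_pos hir]
        have hrow : (0 : Int) + i = r := by omega
        rw [hrow]
        apply List.ext_getElem
        · simp
        · intro j hj1 hj2
          rw [List.getElem_set]
          have hjw : j < (width - 0).toNat := by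
            simpa [PySem.List.length_pyRange_one] using hj2
          rw [List.getElem_map, List.getElem_map, PySem.List.getElem_pyRange_one]
          by_cases hjc : c.toNat = j
          · have hcol : (0 : Int) + j = c := by omega
            rw [if_pos hjc, hcol, if_pos hpar, if_pos rfl]
          · rw [if_neg hjc]
            by_cases hp : ((0 : Int) + j) % 2 = r % 2
            · rw [if_pos hp, if_pos hp,
                  if_neg (by simp only [Prod.mk.injEq, not_and]; intro _ h2; omega)]
            · rw [if_neg hp, if_neg hp]
      · rw [if_neg hir]
        apply List.map_congr_left
        intro col _
        by_cases hp : col % 2 = ((0 : Int) + i) % 2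
        · rw [if_pos hp, if_pos hp,
              if_neg (by simp only [Prod.mk.injEq, not_and]; intro h1 _; omega)]
        · rw [if_neg hp, if_neg hp]
  · rw [if_neg hcond]
    apply List.map_congr_left
    intro row hrow
    rw [PySem.List.mem_pyRange_one] at hrow
    apply List.map_congr_left
    intro col hcol
    rw [PySem.List.mem_pyRange_one] at hcol
    by_cases hp : col % 2 = row % 2
    · rw [if_pos hp, if_pos hp,
          if_neg (by simp only [Prod.mk.injEq, not_and]; intro h1 h2
                     exact hcond ⟨by omega, by omega, by omega, by omega, by omega⟩)]
    · rw [if_neg hp, if_neg hp]
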